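-- pv_equiv track=rewrite | github.com/Kneidl1202/plotRandomDiceEyeDistribution | main.py | create_z_data
-- ===== SOURCE A (Python) =====
-- def create_z_data(xy_data):
--     i = 1
--     counter = 0
--     dice1 = 1
--     dice2 = 1
--     z_data = []
--     while i <= 6:
--         for j in range(1, 7):
--             z_data.append(0)
--             for item in xy_data:
--                 if item[0] == dice1 and item[1] == dice2:
--                     z_data[counter] += 1
--             counter += 1
--             dice2 += 1
--
--         dice1 += 1
--         dice2 = 1
--         i += 1
--
--     return z_data
-- ===== SOURCE B (Python) =====
-- def create_z_data(xy_data):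
--     z_data = [0] * 36
--     for item in xy_data:
--         if len(item) >= 2:
--             d1, d2 = item[0], item[1]
--             if 1 <= d1 <= 6 and 1 <= d2 <= 6:
--                 z_data[(d1 - 1) * 6 + (d2 - 1)] += 1
--     return z_data
-- ===== Notes on version B (the rewrite author's own statement) =====
-- stated objective: alternative
-- what changed: A scans the whole data list once per grid cell ('for each of the 36 cells, count matching items'); B inverts the traversal into a single pass over the data, computing each item's cell index arithmetically ((d1-1)*6+(d2-1)) and incrementing a preallocated 36-cell array.
import Mathlib
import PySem

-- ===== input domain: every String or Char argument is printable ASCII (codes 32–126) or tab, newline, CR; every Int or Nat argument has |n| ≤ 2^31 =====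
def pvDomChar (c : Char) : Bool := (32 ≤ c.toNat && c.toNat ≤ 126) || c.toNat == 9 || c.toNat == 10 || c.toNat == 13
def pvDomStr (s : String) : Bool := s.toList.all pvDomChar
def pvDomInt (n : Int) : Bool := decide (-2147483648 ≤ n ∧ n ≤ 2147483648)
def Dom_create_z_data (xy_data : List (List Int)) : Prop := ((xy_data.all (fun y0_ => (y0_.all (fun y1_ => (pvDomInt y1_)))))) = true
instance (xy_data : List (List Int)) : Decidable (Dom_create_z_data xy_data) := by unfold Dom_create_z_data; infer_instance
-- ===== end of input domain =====

-- B replaces A's 36 passes over the data (one per grid cell) by a single pass that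
-- computes each item's cell index arithmetically; equal return values on Pre_.

-- ===== PORT A =====
-- the inner 'for item in xy_data' loop of A (counter fixed during the loop)
def czInner (xy_data : List (List Int)) (dice1 dice2 : Int) (counter : Nat) (z : List Int) : List Int :=
  xy_data.foldl (fun z item =>
    if PySem.List.pyGet? item 0 = some dice1 ∧ PySem.List.pyGet? item 1 = some dice2
    then z.set counter (z.getD counter 0 + 1) else z) z

-- state: (counter, dice1, dice2, z_data); 'while i <= 6' runs i over 1..6
def create_z_data (xy_data : List (List Int)) : List Int :=
  ((PySem.List.pyRange 1 7).foldl (fun (st : Nat × Int × Int × List Int) _i =>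
      let st2 := (PySem.List.pyRange 1 7).foldl (fun (st : Nat × Int × Int × List Int) _j =>
          let z := czInner xy_data st.2.1 st.2.2.1 st.1 (st.2.2.2 ++ [0])
          (st.1 + 1, st.2.1, st.2.2.1 + 1, z)) st
      (st2.1, st2.2.1 + 1, 1, st2.2.2.2)) ((0 : Nat), (1 : Int), (1 : Int), ([] : List Int))).2.2.2

-- ===== PORT B =====
-- the loop body of Source B
def altStep (z : List Int) (item : List Int) : List Int :=
  if 2 ≤ item.length then
    let d1 := item.getD 0 0
    let d2 := item.getD 1 0
    if 1 ≤ d1 ∧ d1 ≤ 6 ∧ 1 ≤ d2 ∧ d2 ≤ 6 then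
      z.set ((d1 - 1) * 6 + (d2 - 1)).toNat (z.getD ((d1 - 1) * 6 + (d2 - 1)).toNat 0 + 1)
    else z
  else z

def create_z_data_alt (xy_data : List (List Int)) : List Int :=
  xy_data.foldl altStep (List.replicate 36 0)

-- ===== PRECONDITION & SPEC =====
-- Pre_ excludes exactly the inputs on which A raises IndexError: a row that is
-- empty, or a single-element row whose entry lies in 1..6 (its item[1] is read).
def Pre_create_z_data (xy_data : List (List Int)) : Prop :=
  ∀ item ∈ xy_data, 2 ≤ item.length ∨ (item.length = 1 ∧ (item.headI < 1 ∨ 6 < item.headI))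
instance (xy_data : List (List Int)) : Decidable (Pre_create_z_data xy_data) := by
  unfold Pre_create_z_data; infer_instance
def pvWitness_create_z_data : List (List Int) := [[1, 2], [6, 6], [7, 0], [0]]

def Spec_create_z_data (xy_data : List (List Int)) (out : List Int) : Prop := out = create_z_data_alt xy_data
instance (xy_data : List (List Int)) (out : List Int) : Decidable (Spec_create_z_data xy_data out) := by unfold Spec_create_z_data; infer_instance

-- ===== CLAIM (what is proved, stated in full; the proofs are below) =====
def Claim_equal_create_z_data : Prop := ∀ (xy_data : List (List Int)), Dom_create_z_data xy_data → Pre_create_z_data xy_data → Spec_create_z_data xy_data (create_z_data xy_data)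
-- ===== LEMMAS AND PROOFS =====

-- number of items equal to (d1, d2), via A's test
def cntA : List (List Int) → Int → Int → Int
  | [], _, _ => 0
  | it :: xs, d1, d2 =>
    (if PySem.List.pyGet? it 0 = some d1 ∧ PySem.List.pyGet? it 1 = some d2 then 1 else 0)
      + cntA xs d1 d2

def okB (it : List Int) : Bool :=
  decide (2 ≤ it.length ∧ 1 ≤ it.getD 0 0 ∧ it.getD 0 0 ≤ 6 ∧ 1 ≤ it.getD 1 0 ∧ it.getD 1 0 ≤ 6)

def idxB (it : List Int) : Nat := ((it.getD 0 0 - 1) * 6 + (it.getD 1 0 - 1)).toNat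

-- number of items landing in cell k, via B's test
def cntB : List (List Int) → Nat → Int
  | [], _ => 0
  | it :: xs, k => (if okB it ∧ idxB it = k then 1 else 0) + cntB xs k

theorem getD_append_len (z : List Int) (v : Int) : (z ++ [v]).getD z.length 0 = v := by
  simp [List.getD_eq_getElem?_getD]

theorem set_append_len (z : List Int) (v w : Int) : (z ++ [v]).set z.length w = z ++ [w] := by
  induction z with
  | nil => simp
  | cons x xs ih => simp [ih]

theorem inner_eq (d1 d2 : Int) (xy : List (List Int)) :
    ∀ (z : List Int) (v : Int),
      czInner xy d1 d2 z.length (z ++ [v]) = z ++ [v + cntA xy d1 d2] := by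
  induction xy with
  | nil => intro z v; simp [czInner, cntA]
  | cons it xs ih =>
    intro z v
    simp only [czInner, List.foldl_cons] at ih ⊢
    by_cases h : PySem.List.pyGet? it 0 = some d1 ∧ PySem.List.pyGet? it 1 = some d2
    · rw [if_pos h, getD_append_len, set_append_len, ih z (v + 1),
        show cntA (it :: xs) d1 d2 = 1 + cntA xs d1 d2 by simp [cntA, h], add_assoc]
    · rw [if_neg h, ih z v,
        show cntA (it :: xs) d1 d2 = cntA xs d1 d2 by simp [cntA, h]]

theorem cell_eq (xy : List (List Int)) (d1 d2 : Int) (c : Nat) (z : List Int) (v : Int)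
    (h : c = z.length) :
    czInner xy d1 d2 c (z ++ [v]) = z ++ [v + cntA xy d1 d2] := by
  subst h; exact inner_eq d1 d2 xy z v

theorem altStep_eq (z it : List Int) :
    altStep z it = if okB it then z.set (idxB it) (z.getD (idxB it) 0 + 1) else z := by
  unfold altStep okB idxB
  split_ifs with h1 h2 h3 <;> simp_all

theorem altStep_length (z it : List Int) : (altStep z it).length = z.length := by
  rw [altStep_eq]; split_ifs <;> simp

theorem foldl_alt_length (xy : List (List Int)) :
    ∀ z : List Int, (List.foldl altStep z xy).length = z.length := by
  induction xy with
  | nil => intro z; rfl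
  | cons it xs ih => intro z; rw [List.foldl_cons, ih, altStep_length]

theorem getD_foldl_alt (xy : List (List Int)) :
    ∀ (z : List Int) (k : Nat), z.length = 36 → k < 36 →
      (List.foldl altStep z xy).getD k 0 = z.getD k 0 + cntB xy k := by
  induction xy with
  | nil => intro z k _ _; simp [cntB]
  | cons it xs ih =>
    intro z k hz hk
    rw [List.foldl_cons, ih _ k (by rw [altStep_length]; exact hz) hk, altStep_eq]
    by_cases hok : okB it = true
    · have hidx : idxB it < 36 := by
        unfold okB at hok; unfold idxB
        have := of_decide_eq_true hok
        omega
      by_cases hk2 : idxB it = k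
      · subst hk2
        rw [if_pos hok]
        simp only [List.getD_eq_getElem?_getD, List.getElem?_set_self (by omega : idxB it < z.length)]
        simp [cntB, hok]
        ring
      · rw [if_pos hok]
        simp only [List.getD_eq_getElem?_getD, List.getElem?_set_ne hk2]
        simp [cntB, hok, hk2]
    · rw [if_neg hok]
      simp [cntB, hok]

theorem B_eq (xy : List (List Int)) :
    create_z_data_alt xy = (List.range 36).map (fun k => cntB xy k) := by
  apply List.ext_getElem
  · simp [create_z_data_alt, foldl_alt_length]
  · intro i h1 h2
    have hi : i < 36 := by
      have := h1; rwa [show (create_z_data_alt xy).length = 36 by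
        simp [create_z_data_alt, foldl_alt_length]] at this
    have hmain := getD_foldl_alt xy (List.replicate 36 0) i (by simp) hi
    simp only [create_z_data_alt] at h1 ⊢
    rw [List.getElem_map, List.getElem_range, ← List.getD_eq_getElem _ 0 h1, hmain,
      List.getD_eq_getElem?_getD, List.getElem?_replicate, if_pos hi,
      Option.getD_some, zero_add]

theorem cnt_bridge (xy : List (List Int))
    (hpre : ∀ it ∈ xy, 2 ≤ it.length ∨ (it.length = 1 ∧ (it.headI < 1 ∨ 6 < it.headI)))
    (d1 d2 : Int) (h1 : 1 ≤ d1) (h2 : d1 ≤ 6) (h3 : 1 ≤ d2) (h4 : d2 ≤ 6) :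
    cntA xy d1 d2 = cntB xy (((d1 - 1) * 6 + (d2 - 1)).toNat) := by
  induction xy with
  | nil => rfl
  | cons it xs ih =>
    have hp := hpre it (by simp)
    have htail := ih (fun i hi => hpre i (by simp [hi]))
    simp only [cntA, cntB]
    rw [htail]
    congr 1
    rcases hp with hlen | ⟨hlen1, hout⟩
    · obtain ⟨x, y, t, rfl⟩ : ∃ x y t, it = x :: y :: t := by
        match it, hlen with | x :: y :: t, _ => exact ⟨x, y, t, rfl⟩
      have hg2 : PySem.List.pyGet? (x :: y :: t) 1 = some y := by
        simp [PySem.List.pyGet?, PySem.List.pyIdx?]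
      have hiff : (PySem.List.pyGet? (x :: y :: t) 0 = some d1 ∧
          PySem.List.pyGet? (x :: y :: t) 1 = some d2) ↔
          (okB (x :: y :: t) = true ∧ idxB (x :: y :: t) = ((d1 - 1) * 6 + (d2 - 1)).toNat) := by
        rw [hg2]
        simp only [PySem.List.pyGet?_zero_cons, Option.some.injEq, okB, idxB,
          decide_eq_true_eq, List.getD_cons_zero, List.getD_cons_succ, List.length_cons]
        omega
      rw [if_congr hiff rfl rfl]
    · obtain ⟨x, rfl⟩ : ∃ x, it = [x] := by
        match it, hlen1 with | [x], _ => exact ⟨x, rfl⟩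
      have hA : PySem.List.pyGet? [x] 1 = none := by
        simp [PySem.List.pyGet?, PySem.List.pyIdx?]
      rw [hA]
      simp [okB]

theorem range36 : List.range 36 =
    [0,1,2,3,4,5,6,7,8,9,10,11,12,13,14,15,16,17,18,19,20,21,22,23,24,25,26,27,28,29,30,31,32,33,34,35] := by
  rfl

theorem pyRange17 : PySem.List.pyRange 1 7 = [1, 2, 3, 4, 5, 6] := by decide

-- ===== VERDICT (by name: the statement is the Claim_ definition above) =====
theorem create_z_data_spec : Claim_equal_create_z_data := by
  intro xy hdom hpre
  unfold Spec_create_z_data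
  rw [B_eq, range36]
  unfold create_z_data
  rw [pyRange17]
  simp only [List.foldl_cons, List.foldl_nil]
  simp only [cell_eq, List.length_append, List.length_cons, List.length_nil,
    Nat.reduceAdd, Int.reduceAdd, zero_add]
  simp [cnt_bridge xy hpre]
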